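-- pv_equiv track=rewrite | github.com/mdbahul/CGT | functions.py | vertex_connectivity
-- ===== SOURCE A (Python) =====
-- def dfs(graph, vertex, visited):
--     visited.add(vertex)
--     for neighbor in graph[vertex]:
--         if neighbor not in visited:
--             dfs(graph, neighbor, visited)
--
-- def is_connected(graph):
--     start_node = next((node for node in graph if len(graph[node]) > 0), None)
--     if start_node is None:
--         return True  # Trivially connected if no edges
--
--     visited = set()
--
--     dfs(graph, start_node, visited)
--
--     for node in graph:
--         if len(graph[node]) > 0 and node not in visited:
--             return False
--
--     return True
--
-- def remove_vertices(graph, vertices_to_remove):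
--     new_graph = {}
--     for vertex, neighbors in graph.items():
--         if vertex not in vertices_to_remove:
--             new_graph[vertex] = [n for n in neighbors if n not in vertices_to_remove]
--     return new_graph
--
-- def vertex_connectivity(graph):
--     vertices = list(graph.keys())
--     n = len(vertices)
--
--     for k in range(1, n):
--         for i in range(len(vertices)):
--             for j in range(i + 1, len(vertices)):
--                 for l in range(j + 1, len(vertices)):
--                     vertices_to_remove = [vertices[i], vertices[j], vertices[l]]
--                     new_graph = remove_vertices(graph, vertices_to_remove)
--                     if not is_connected(new_graph):
--                         return len(vertices_to_remove), vertices_to_remove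
--
--     return n - 1, []
-- ===== SOURCE B (Python) =====
-- # B: same brute-force triple search, but the dead outer k-loop is dropped (A re-runs the
-- # identical scan n-1 times before giving up) and connectivity is tested with an iterative
-- # explicit-stack traversal instead of A's recursive dfs.
--
-- def _pairs(vs):
--     if len(vs) >= 2:
--         head, tail = vs[0], vs[1:]
--         for y in tail:
--             yield [head, y]
--         yield from _pairs(tail)
--
-- def _triples(vs):
--     if len(vs) >= 3:
--         head, tail = vs[0], vs[1:]
--         for p in _pairs(tail):
--             yield [head] + p
--         yield from _triples(tail)
--
-- def _connected(graph):
--     start = next((node for node in graph if len(graph[node]) > 0), None)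
--     if start is None:
--         return True
--     visited = set()
--     stack = [[start]]
--     while stack:
--         frame = stack[-1]
--         if not frame:
--             stack.pop()
--             continue
--         nb = frame[0]
--         stack[-1] = frame[1:]
--         if nb not in visited:
--             visited.add(nb)
--             stack.append(list(graph[nb]))
--     return all(len(graph[node]) == 0 or node in visited for node in graph)
--
-- def _remove(graph, removed):
--     return {v: [n for n in ns if n not in removed]
--             for v, ns in graph.items() if v not in removed}
--
-- def vertex_connectivity(graph):
--     vertices = list(graph)
--     for triple in _triples(vertices):
--         if not _connected(_remove(graph, triple)):
--             return 3, triple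
--     return len(vertices) - 1, []
-- ===== Notes on version B (the rewrite author's own statement) =====
-- stated objective: faster
-- what changed: B drops A's dead outer k-loop (A re-runs the identical O(n^3) triple scan n-1 times before returning the fallback) and enumerates triples lazily by structural recursion, and it tests connectivity with an iterative explicit-stack worklist instead of A's recursive dfs helper.
import Mathlib
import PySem

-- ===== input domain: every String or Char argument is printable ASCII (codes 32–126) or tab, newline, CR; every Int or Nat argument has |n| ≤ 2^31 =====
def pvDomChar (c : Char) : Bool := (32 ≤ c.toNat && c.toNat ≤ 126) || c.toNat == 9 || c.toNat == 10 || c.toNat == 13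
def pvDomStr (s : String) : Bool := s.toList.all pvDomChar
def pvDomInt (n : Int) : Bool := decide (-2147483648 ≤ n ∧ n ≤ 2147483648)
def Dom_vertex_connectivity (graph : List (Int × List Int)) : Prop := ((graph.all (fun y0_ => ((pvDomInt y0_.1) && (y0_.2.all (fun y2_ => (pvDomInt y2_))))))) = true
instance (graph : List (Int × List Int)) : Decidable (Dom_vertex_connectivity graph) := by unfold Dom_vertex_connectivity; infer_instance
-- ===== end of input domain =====

-- B drops A's dead outer k-loop (A re-runs the identical triple scan n-1 times before giving up)
-- and replaces the recursive dfs by an iterative explicit-stack traversal; return values are identical.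

-- ===== PORT A =====

-- fuel bounding the recursion depth of A's dfs (depth ≤ number of distinct vertices ever
-- visited ≤ keys + all neighbour values); purely a termination device, never reached.
def pvDfsFuelA (g : PySem.Dict Int (List Int)) : Nat :=
  g.items.length + (g.items.map (fun p => p.2.length)).sum + 1

-- A's `dfs(graph, vertex, visited)`: the `visited.add(vertex)` of a call is performed at its
-- call site, so `dfsA g f (graph[v]) (visited.add v)` is the body of `dfs(graph, v, visited)`.
-- `graph[vertex]` is ported as getD with default []: inside Pre_ every visited vertex is a key
-- (outside, Python raises KeyError there).
def dfsA (g : PySem.Dict Int (List Int)) (f : Nat) (ns : List Int) (vis : PySem.Set Int) :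
    PySem.Set Int :=
  match ns with
  | [] => vis
  | nb :: rest =>
    if nb ∈ vis then dfsA g f rest vis
    else
      match f with
      | 0 => vis
      | f' + 1 => dfsA g (f' + 1) rest (dfsA g f' (g.getD nb []) (PySem.Set.add vis nb))
termination_by (f, ns.length)

def is_connectedA (g : PySem.Dict Int (List Int)) : Bool :=
  match g.keys.find? (fun node => decide (0 < (g.getD node []).length)) with
  | none => true
  | some start =>
    let visited := dfsA g (pvDfsFuelA g) (g.getD start []) (PySem.Set.add PySem.Set.empty start)
    -- `for node in graph: if len(graph[node]) > 0 and node not in visited: return False`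
    g.keys.all (fun node => decide ((g.getD node []).length = 0) || decide (node ∈ visited))

def remove_verticesA (g : PySem.Dict Int (List Int)) (rem : List Int) :
    PySem.Dict Int (List Int) :=
  g.items.foldl
    (fun ng p =>
      if p.1 ∈ rem then ng
      else ng.insert p.1 (p.2.filter (fun n => decide (n ∉ rem))))
    PySem.Dict.empty

-- `for l in range(j+1, len(vertices)): …` with early return
def lLoopA (g : PySem.Dict Int (List Int)) (vs : List Int) (i j : Int) :
    List Int → Option (Int × List Int)
  | [] => none
  | l :: ls =>
    let rem := [PySem.List.pyGetD vs i 0, PySem.List.pyGetD vs j 0, PySem.List.pyGetD vs l 0]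
    -- indices produced by range(len(vertices)) are always in range, so the default 0 is dead
    if !(is_connectedA (remove_verticesA g rem)) then some ((rem.length : Int), rem)
    else lLoopA g vs i j ls

def jLoopA (g : PySem.Dict Int (List Int)) (vs : List Int) (i : Int) :
    List Int → Option (Int × List Int)
  | [] => none
  | j :: js =>
    match lLoopA g vs i j (PySem.List.pyRange (j + 1) (vs.length : Int)) with
    | some r => some r
    | none => jLoopA g vs i js

def iLoopA (g : PySem.Dict Int (List Int)) (vs : List Int) :
    List Int → Option (Int × List Int)
  | [] => none
  | i :: is_ =>
    match jLoopA g vs i (PySem.List.pyRange (i + 1) (vs.length : Int)) with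
    | some r => some r
    | none => iLoopA g vs is_

def kLoopA (g : PySem.Dict Int (List Int)) (vs : List Int) : List Int → Int × List Int
  | [] => ((vs.length : Int) - 1, [])
  | _ :: ks =>
    match iLoopA g vs (PySem.List.pyRange 0 (vs.length : Int)) with
    | some r => r
    | none => kLoopA g vs ks

def vertex_connectivity (graph : List (Int × List Int)) : Int × List Int :=
  let g : PySem.Dict Int (List Int) := ⟨graph⟩
  let vertices := g.keys
  kLoopA g vertices (PySem.List.pyRange 1 (vertices.length : Int))

-- ===== PORT B =====

def pairsB : List Int → List (List Int)
  | [] => []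
  | x :: tail => tail.map (fun y => [x, y]) ++ pairsB tail

def triplesB : List Int → List (List Int)
  | [] => []
  | x :: tail => (pairsB tail).map (fun p => x :: p) ++ triplesB tail

-- fuel of B's while-loop: spent only when a new vertex is visited, so one unit per key
-- plus one per stored neighbour value suffices; purely a termination device, never reached.
def pvStackFuelB (g : PySem.Dict Int (List Int)) : Nat :=
  (g.items.map (fun p => p.2.length + 1)).sum + 1

-- B's `while stack:` worklist (top frame = stack[-1] is the head of the list here)
def stackLoopB (g : PySem.Dict Int (List Int)) (f : Nat) (stack : List (List Int))
    (vis : PySem.Set Int) : PySem.Set Int :=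
  match stack with
  | [] => vis
  | [] :: rest => stackLoopB g f rest vis
  | (nb :: frame) :: rest =>
    if nb ∈ vis then stackLoopB g f (frame :: rest) vis
    else
      match f with
      | 0 => vis
      | f' + 1 => stackLoopB g f' (g.getD nb [] :: frame :: rest) (PySem.Set.add vis nb)
termination_by (f, (stack.map List.length).sum, stack.length)

def is_connectedB (g : PySem.Dict Int (List Int)) : Bool :=
  match g.keys.find? (fun node => decide (0 < (g.getD node []).length)) with
  | none => true
  | some start =>
    let visited := stackLoopB g (pvStackFuelB g) [[start]] PySem.Set.empty
    g.keys.all (fun node => decide ((g.getD node []).length = 0) || decide (node ∈ visited))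

def remove_verticesB (g : PySem.Dict Int (List Int)) (rem : List Int) :
    PySem.Dict Int (List Int) :=
  ⟨g.items.filterMap (fun p =>
    if p.1 ∈ rem then none
    else some (p.1, p.2.filter (fun n => decide (n ∉ rem))))⟩

def vertex_connectivity_alt (graph : List (Int × List Int)) : Int × List Int :=
  let g : PySem.Dict Int (List Int) := ⟨graph⟩
  let vertices := g.keys
  -- `for triple in _triples(vertices): if not _connected(...): return 3, triple`
  match (triplesB vertices).find? (fun t => !(is_connectedB (remove_verticesB g t))) with
  | some t => (3, t)
  | none => ((vertices.length : Int) - 1, [])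

-- ===== PRECONDITION & SPEC =====
-- Pre_ excludes (a) duplicate keys, which a Python dict cannot have (the association list is the
-- dict's items), and (b) graphs with ≥ 4 vertices in which some neighbour is not a key: there A's
-- dfs can reach the missing key and raise KeyError (with ≤ 3 vertices no triple is ever removed,
-- so A returns without touching neighbours).
def Pre_vertex_connectivity (graph : List (Int × List Int)) : Prop :=
  (graph.map Prod.fst).Nodup ∧
    (4 ≤ graph.length → ∀ p ∈ graph, ∀ n ∈ p.2, n ∈ graph.map Prod.fst)
instance (graph : List (Int × List Int)) : Decidable (Pre_vertex_connectivity graph) := by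
  unfold Pre_vertex_connectivity; infer_instance

def pvWitness_vertex_connectivity : (List (Int × List Int)) :=
  [(0, [1]), (1, [0]), (2, [3]), (3, [2])]

def Spec_vertex_connectivity (graph : List (Int × List Int)) (out : Int × List Int) : Prop := out = vertex_connectivity_alt graph
instance (graph : List (Int × List Int)) (out : Int × List Int) : Decidable (Spec_vertex_connectivity graph out) := by unfold Spec_vertex_connectivity; infer_instance

-- ===== CLAIM (what is proved, stated in full; the proofs are below) =====
def Claim_equal_vertex_connectivity : Prop := ∀ (graph : List (Int × List Int)), Dom_vertex_connectivity graph → Pre_vertex_connectivity graph → Spec_vertex_connectivity graph (vertex_connectivity graph)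

-- ===== LEMMAS AND PROOFS =====

-- ---------- graph-reachability infrastructure ----------

def pvNbr (g : PySem.Dict Int (List Int)) (a b : Int) : Prop := b ∈ g.getD a []

def pvReach (g : PySem.Dict Int (List Int)) (s x : Int) : Prop :=
  Relation.ReflTransGen (pvNbr g) s x

def pvNset (g : PySem.Dict Int (List Int)) : Finset Int :=
  g.keys.toFinset ∪ (g.items.flatMap Prod.snd).toFinset

lemma pvNbr_mem_Nset {g : PySem.Dict Int (List Int)} {a b : Int} (h : pvNbr g a b) :
    b ∈ pvNset g := by
  unfold pvNbr at h
  rcases hg : g.get? a with _ | v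
  · rw [PySem.Dict.getD_eq_get?_getD, hg] at h; simp at h
  · rw [PySem.Dict.getD_eq_get?_getD, hg] at h
    simp only [Option.getD_some] at h
    have hm := PySem.Dict.mem_items_of_get?_eq_some (d := g) hg
    simp only [pvNset, Finset.mem_union, List.mem_toFinset]
    exact Or.inr (List.mem_flatMap.mpr ⟨(a, v), hm, h⟩)

lemma pvNset_card_le (g : PySem.Dict Int (List Int)) :
    (pvNset g).card ≤ g.items.length + (g.items.map (fun p => p.2.length)).sum := by
  calc (pvNset g).card ≤ g.keys.toFinset.card + (g.items.flatMap Prod.snd).toFinset.card :=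
        Finset.card_union_le _ _
    _ ≤ g.keys.length + (g.items.flatMap Prod.snd).length :=
        Nat.add_le_add (List.toFinset_card_le _) (List.toFinset_card_le _)
    _ = g.items.length + (g.items.map (fun p => p.2.length)).sum := by
        simp [PySem.Dict.keys, List.length_flatMap]


lemma pv_card_add_lt {s : Finset Int} {vis : PySem.Set Int} {nb : Int} (hnb : nb ∉ vis)
    (hN : nb ∈ s) {f : Nat} (hc : (s \ vis.toFinset).card < f + 1) :
    (s \ (PySem.Set.add vis nb).toFinset).card < f := by
  have htfs : (PySem.Set.add vis nb).toFinset = insert nb vis.toFinset := by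
    rw [PySem.Set.add_of_not_mem hnb]; simp [List.toFinset_append]
  have hnbd : nb ∈ s \ vis.toFinset := by
    simp only [Finset.mem_sdiff, List.mem_toFinset]; exact ⟨hN, hnb⟩
  rw [htfs, Finset.sdiff_insert]
  have h1 := Finset.card_erase_of_mem hnbd
  have h2 := Finset.card_pos.mpr ⟨nb, hnbd⟩
  omega

-- ---------- A's recursive dfs computes exactly the reachable set ----------

lemma dfsA_sound (g : PySem.Dict Int (List Int)) (P : Int → Prop)
    (hP : ∀ a b, P a → pvNbr g a b → P b) (f : Nat) (ns : List Int) (vis : PySem.Set Int) :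
    (∀ x ∈ ns, P x) → (∀ x ∈ vis, P x) → ∀ x ∈ dfsA g f ns vis, P x := by
  fun_induction dfsA g f ns vis with
  | case1 => exact fun _ hv => hv
  | case2 f vis nb rest hmem ih =>
    intro hns hv
    exact ih (fun x hx => hns x (List.mem_cons_of_mem _ hx)) hv
  | case3 => exact fun _ hv => hv
  | case4 vis nb rest hnb f' ih2 ih1 =>
    intro hns hv
    have hnbP : P nb := hns nb List.mem_cons_self
    have hinner : ∀ x ∈ dfsA g f' (g.getD nb []) (vis.add nb), P x := by
      refine ih2 (fun x hx => hP nb x hnbP hx) ?_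
      intro x hx
      rcases (PySem.Set.mem_add vis nb x).mp hx with h | h
      · exact hv x h
      · exact h ▸ hnbP
    exact ih1 (fun x hx => hns x (List.mem_cons_of_mem _ hx)) hinner

lemma dfsA_main (g : PySem.Dict Int (List Int)) (f : Nat) (ns : List Int) (vis : PySem.Set Int) :
    (∀ x ∈ ns, x ∈ pvNset g) → (pvNset g \ vis.toFinset).card < f →
      (∀ x ∈ vis, x ∈ dfsA g f ns vis) ∧ (∀ x ∈ ns, x ∈ dfsA g f ns vis) ∧
        (∀ u ∈ dfsA g f ns vis, u ∉ vis → ∀ w, pvNbr g u w → w ∈ dfsA g f ns vis) := by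
  fun_induction dfsA g f ns vis with
  | case1 f vis =>
    intro _ _
    exact ⟨fun x hx => hx, by simp, fun u hu hu' => absurd hu hu'⟩
  | case2 f vis nb rest hmem ih =>
    intro hns hc
    obtain ⟨h1, h2, h3⟩ := ih (fun x hx => hns x (List.mem_cons_of_mem _ hx)) hc
    refine ⟨h1, ?_, h3⟩
    intro x hx
    rcases List.mem_cons.mp hx with rfl | hx
    · exact h1 x hmem
    · exact h2 x hx
  | case3 vis nb rest hnb =>
    intro hns hc
    exact absurd hc (by omega)
  | case4 vis nb rest hnb f' ih2 ih1 =>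
    intro hns hc
    have hnbN : nb ∈ pvNset g := hns nb List.mem_cons_self
    have hc' : (pvNset g \ (PySem.Set.add vis nb).toFinset).card < f' :=
      pv_card_add_lt hnb hnbN hc
    obtain ⟨i1, i2, i3⟩ := ih2 (fun x hx => pvNbr_mem_Nset hx) hc'
    set inner := dfsA g f' (g.getD nb []) (PySem.Set.add vis nb) with hinner
    have hcI : (pvNset g \ inner.toFinset).card < f' + 1 := by
      have hsub : (PySem.Set.add vis nb).toFinset ⊆ inner.toFinset := by
        intro x hx; exact List.mem_toFinset.mpr (i1 x (List.mem_toFinset.mp hx))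
      have : pvNset g \ inner.toFinset ⊆ pvNset g \ (PySem.Set.add vis nb).toFinset :=
        Finset.sdiff_subset_sdiff (Finset.Subset.refl _) hsub
      have := Finset.card_le_card this
      omega
    obtain ⟨o1, o2, o3⟩ := ih1 (fun x hx => hns x (List.mem_cons_of_mem _ hx)) hcI
    have hvisR : ∀ x ∈ vis, x ∈ dfsA g (f' + 1) rest inner := by
      intro x hx
      exact o1 x (i1 x ((PySem.Set.mem_add vis nb x).mpr (Or.inl hx)))
    have hnbR : nb ∈ dfsA g (f' + 1) rest inner :=
      o1 nb (i1 nb ((PySem.Set.mem_add vis nb nb).mpr (Or.inr rfl)))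
    refine ⟨hvisR, ?_, ?_⟩
    · intro x hx
      rcases List.mem_cons.mp hx with rfl | hx
      · exact hnbR
      · exact o2 x hx
    · intro u hu hu' w hw
      by_cases hui : u ∈ inner
      · by_cases hua : u ∈ PySem.Set.add vis nb
        · have hu_nb : u = nb := by
            rcases (PySem.Set.mem_add vis nb u).mp hua with h | h
            · exact absurd h hu'
            · exact h
          subst hu_nb
          exact o1 w (i2 w hw)
        · exact o1 w (i3 u hui hua w hw)
      · exact o3 u hu hui w hw

-- ---------- B's explicit-stack loop computes exactly the reachable set ----------

lemma stackB_sound (g : PySem.Dict Int (List Int)) (P : Int → Prop)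
    (hP : ∀ a b, P a → pvNbr g a b → P b) (f : Nat) (stack : List (List Int))
    (vis : PySem.Set Int) :
    (∀ fr ∈ stack, ∀ x ∈ fr, P x) → (∀ x ∈ vis, P x) → ∀ x ∈ stackLoopB g f stack vis, P x := by
  fun_induction stackLoopB g f stack vis with
  | case1 => exact fun _ hv => hv
  | case2 f vis rest ih =>
    intro hs hv
    exact ih (fun fr hfr => hs fr (List.mem_cons_of_mem _ hfr)) hv
  | case3 f vis nb frame rest hmem ih =>
    intro hs hv
    refine ih ?_ hv
    intro fr hfr
    rcases List.mem_cons.mp hfr with rfl | hfr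
    · exact fun x hx => hs (nb :: fr) List.mem_cons_self x (List.mem_cons_of_mem _ hx)
    · exact hs fr (List.mem_cons_of_mem _ hfr)
  | case4 => exact fun _ hv => hv
  | case5 vis nb frame rest hnb f' ih =>
    intro hs hv
    have hnbP : P nb := hs (nb :: frame) List.mem_cons_self nb List.mem_cons_self
    refine ih ?_ ?_
    · intro fr hfr
      rcases List.mem_cons.mp hfr with rfl | hfr
      · exact fun x hx => hP nb x hnbP hx
      · rcases List.mem_cons.mp hfr with rfl | hfr
        · exact fun x hx => hs (nb :: fr) List.mem_cons_self x (List.mem_cons_of_mem _ hx)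
        · exact hs fr (List.mem_cons_of_mem _ hfr)
    · intro x hx
      rcases (PySem.Set.mem_add vis nb x).mp hx with h | h
      · exact hv x h
      · exact h ▸ hnbP

lemma stackB_main (g : PySem.Dict Int (List Int)) (f : Nat) (stack : List (List Int))
    (vis : PySem.Set Int) :
    (∀ fr ∈ stack, ∀ x ∈ fr, x ∈ pvNset g) → (pvNset g \ vis.toFinset).card < f →
      (∀ u ∈ vis, ∀ w, pvNbr g u w → w ∈ vis ∨ ∃ fr ∈ stack, w ∈ fr) →
      (∀ x ∈ vis, x ∈ stackLoopB g f stack vis) ∧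
        (∀ fr ∈ stack, ∀ x ∈ fr, x ∈ stackLoopB g f stack vis) ∧
        (∀ u ∈ stackLoopB g f stack vis, ∀ w, pvNbr g u w → w ∈ stackLoopB g f stack vis) := by
  fun_induction stackLoopB g f stack vis with
  | case1 f vis =>
    intro _ _ hinv
    refine ⟨fun x hx => hx, by simp, ?_⟩
    intro u hu w hw
    rcases hinv u hu w hw with h | ⟨fr, hfr, _⟩
    · exact h
    · simp at hfr
  | case2 f vis rest ih =>
    intro hs hc hinv
    have hinv' : ∀ u ∈ vis, ∀ w, pvNbr g u w → w ∈ vis ∨ ∃ fr ∈ rest, w ∈ fr := by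
      intro u hu w hw
      rcases hinv u hu w hw with h | ⟨fr, hfr, hwf⟩
      · exact Or.inl h
      · rcases List.mem_cons.mp hfr with rfl | hfr
        · simp at hwf
        · exact Or.inr ⟨fr, hfr, hwf⟩
    obtain ⟨h1, h2, h3⟩ := ih (fun fr hfr => hs fr (List.mem_cons_of_mem _ hfr)) hc hinv'
    refine ⟨h1, ?_, h3⟩
    intro fr hfr
    rcases List.mem_cons.mp hfr with rfl | hfr
    · exact fun x hx => by simp at hx
    · exact h2 fr hfr
  | case3 f vis nb frame rest hmem ih =>
    intro hs hc hinv
    have hframes : ∀ fr ∈ frame :: rest, ∀ x ∈ fr, x ∈ pvNset g := by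
      intro fr hfr
      rcases List.mem_cons.mp hfr with rfl | hfr
      · exact fun x hx => hs (nb :: fr) List.mem_cons_self x (List.mem_cons_of_mem _ hx)
      · exact hs fr (List.mem_cons_of_mem _ hfr)
    have hinv' : ∀ u ∈ vis, ∀ w, pvNbr g u w → w ∈ vis ∨ ∃ fr ∈ frame :: rest, w ∈ fr := by
      intro u hu w hw
      rcases hinv u hu w hw with h | ⟨fr, hfr, hwf⟩
      · exact Or.inl h
      · rcases List.mem_cons.mp hfr with rfl | hfr
        · rcases List.mem_cons.mp hwf with rfl | hwf
          · exact Or.inl hmem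
          · exact Or.inr ⟨frame, List.mem_cons_self, hwf⟩
        · exact Or.inr ⟨fr, List.mem_cons_of_mem _ hfr, hwf⟩
    obtain ⟨h1, h2, h3⟩ := ih hframes hc hinv'
    refine ⟨h1, ?_, h3⟩
    intro fr hfr
    rcases List.mem_cons.mp hfr with rfl | hfr
    · intro x hx
      rcases List.mem_cons.mp hx with rfl | hx
      · exact h1 x hmem
      · exact h2 frame List.mem_cons_self x hx
    · exact h2 fr (List.mem_cons_of_mem _ hfr)
  | case4 vis nb frame rest hnb =>
    intro hs hc hinv
    have hnbN : nb ∈ pvNset g := hs (nb :: frame) List.mem_cons_self nb List.mem_cons_self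
    have : nb ∈ pvNset g \ vis.toFinset := by
      simp only [Finset.mem_sdiff, List.mem_toFinset]; exact ⟨hnbN, hnb⟩
    have := Finset.card_pos.mpr ⟨nb, this⟩
    omega
  | case5 vis nb frame rest hnb f' ih =>
    intro hs hc hinv
    have hnbN : nb ∈ pvNset g := hs (nb :: frame) List.mem_cons_self nb List.mem_cons_self
    have hc' : (pvNset g \ (PySem.Set.add vis nb).toFinset).card < f' :=
      pv_card_add_lt hnb hnbN hc
    have hframes : ∀ fr ∈ g.getD nb [] :: frame :: rest, ∀ x ∈ fr, x ∈ pvNset g := by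
      intro fr hfr
      rcases List.mem_cons.mp hfr with rfl | hfr
      · exact fun x hx => pvNbr_mem_Nset hx
      · rcases List.mem_cons.mp hfr with rfl | hfr
        · exact fun x hx => hs (nb :: fr) List.mem_cons_self x (List.mem_cons_of_mem _ hx)
        · exact hs fr (List.mem_cons_of_mem _ hfr)
    have hinv' : ∀ u ∈ PySem.Set.add vis nb, ∀ w, pvNbr g u w →
        w ∈ PySem.Set.add vis nb ∨ ∃ fr ∈ g.getD nb [] :: frame :: rest, w ∈ fr := by
      intro u hu w hw
      rcases (PySem.Set.mem_add vis nb u).mp hu with hu' | rfl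
      · rcases hinv u hu' w hw with h | ⟨fr, hfr, hwf⟩
        · exact Or.inl ((PySem.Set.mem_add vis nb w).mpr (Or.inl h))
        · rcases List.mem_cons.mp hfr with rfl | hfr
          · rcases List.mem_cons.mp hwf with rfl | hwf
            · exact Or.inl ((PySem.Set.mem_add vis w w).mpr (Or.inr rfl))
            · exact Or.inr ⟨frame, List.mem_cons_of_mem _ List.mem_cons_self, hwf⟩
          · exact Or.inr ⟨fr, List.mem_cons_of_mem _ (List.mem_cons_of_mem _ hfr), hwf⟩
      · exact Or.inr ⟨g.getD u [], List.mem_cons_self, hw⟩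
    obtain ⟨h1, h2, h3⟩ := ih hframes hc' hinv'
    have hvA : ∀ x ∈ vis, x ∈ stackLoopB g f' (g.getD nb [] :: frame :: rest) (PySem.Set.add vis nb) := by
      intro x hx; exact h1 x ((PySem.Set.mem_add vis nb x).mpr (Or.inl hx))
    have hnbA : nb ∈ stackLoopB g f' (g.getD nb [] :: frame :: rest) (PySem.Set.add vis nb) :=
      h1 nb ((PySem.Set.mem_add vis nb nb).mpr (Or.inr rfl))
    refine ⟨hvA, ?_, h3⟩
    intro fr hfr
    rcases List.mem_cons.mp hfr with rfl | hfr
    · intro x hx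
      rcases List.mem_cons.mp hx with rfl | hx
      · exact hnbA
      · exact h2 frame (List.mem_cons_of_mem _ List.mem_cons_self) x hx
    · exact h2 fr (List.mem_cons_of_mem _ (List.mem_cons_of_mem _ hfr))

lemma pv_start_mem_Nset {g : PySem.Dict Int (List Int)} {start : Int}
    (h : start ∈ g.keys) : start ∈ pvNset g := by
  simp only [pvNset, Finset.mem_union, List.mem_toFinset]
  exact Or.inl h

lemma mem_dfsA_iff_reach (g : PySem.Dict Int (List Int)) (start x : Int) :
    (x ∈ dfsA g (pvDfsFuelA g) (g.getD start []) (PySem.Set.add PySem.Set.empty start)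
      ↔ pvReach g start x) := by
  have hvis0 : PySem.Set.add PySem.Set.empty start = [start] := rfl
  constructor
  · intro hx
    refine dfsA_sound g (pvReach g start) ?_ _ _ _ ?_ ?_ x hx
    · exact fun a b ha hb => Relation.ReflTransGen.tail ha hb
    · exact fun y hy => Relation.ReflTransGen.single hy
    · intro y hy
      rw [hvis0, List.mem_singleton] at hy
      exact hy ▸ Relation.ReflTransGen.refl
  · intro hx
    have hcard : (pvNset g \ (PySem.Set.add PySem.Set.empty start).toFinset).card
        < pvDfsFuelA g := by
      have h1 : (pvNset g \ (PySem.Set.add PySem.Set.empty start).toFinset).card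
          ≤ (pvNset g).card := Finset.card_le_card (Finset.sdiff_subset)
      have h2 := pvNset_card_le g
      unfold pvDfsFuelA
      omega
    obtain ⟨h1, h2, h3⟩ := dfsA_main g (pvDfsFuelA g) (g.getD start [])
      (PySem.Set.add PySem.Set.empty start) (fun y hy => pvNbr_mem_Nset hy) hcard
    set R := dfsA g (pvDfsFuelA g) (g.getD start []) (PySem.Set.add PySem.Set.empty start)
    have hstart : start ∈ R := h1 start (by rw [hvis0]; exact List.mem_singleton.mpr rfl)
    have hclosed : ∀ u ∈ R, ∀ w, pvNbr g u w → w ∈ R := by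
      intro u hu w hw
      by_cases hus : u ∈ PySem.Set.add PySem.Set.empty start
      · have : u = start := by
          rw [hvis0, List.mem_singleton] at hus; exact hus
        subst this
        exact h2 w hw
      · exact h3 u hu hus w hw
    induction hx with
    | refl => exact hstart
    | tail _ hbc ih => exact hclosed _ ih _ hbc
lemma mem_stackB_iff_reach (g : PySem.Dict Int (List Int)) (start x : Int)
    (hkey : start ∈ g.keys) :
    (x ∈ stackLoopB g (pvStackFuelB g) [[start]] PySem.Set.empty ↔ pvReach g start x) := by
  constructor
  · intro hx
    refine stackB_sound g (pvReach g start) ?_ _ _ _ ?_ ?_ x hx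
    · exact fun a b ha hb => Relation.ReflTransGen.tail ha hb
    · intro fr hfr
      rw [List.mem_singleton] at hfr
      subst hfr
      intro y hy
      rw [List.mem_singleton] at hy
      exact hy ▸ Relation.ReflTransGen.refl
    · intro y hy; simp [PySem.Set.empty] at hy
  · intro hx
    have hcard : (pvNset g \ (PySem.Set.empty : PySem.Set Int).toFinset).card
        < pvStackFuelB g := by
      have h1 : (pvNset g \ (PySem.Set.empty : PySem.Set Int).toFinset).card
          ≤ (pvNset g).card := Finset.card_le_card (Finset.sdiff_subset)
      have h2 := pvNset_card_le g
      have h3 : ((g.items.map (fun p => p.2.length + 1)).sum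
          = (g.items.map (fun p => p.2.length)).sum + g.items.length) := by
        induction g.items with
        | nil => rfl
        | cons p l ih => simp [ih]; omega
      unfold pvStackFuelB
      omega
    have hframes : ∀ fr ∈ [[start]], ∀ y ∈ fr, y ∈ pvNset g := by
      intro fr hfr
      rw [List.mem_singleton] at hfr
      subst hfr
      intro y hy
      rw [List.mem_singleton] at hy
      exact hy ▸ pv_start_mem_Nset hkey
    have hinv : ∀ u ∈ (PySem.Set.empty : PySem.Set Int), ∀ w, pvNbr g u w →
        w ∈ (PySem.Set.empty : PySem.Set Int) ∨ ∃ fr ∈ [[start]], w ∈ fr := by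
      intro u hu; simp [PySem.Set.empty] at hu
    obtain ⟨h1, h2, h3⟩ := stackB_main g (pvStackFuelB g) [[start]] PySem.Set.empty
      hframes hcard hinv
    have hstart : start ∈ stackLoopB g (pvStackFuelB g) [[start]] PySem.Set.empty :=
      h2 [start] (List.mem_singleton.mpr rfl) start (List.mem_singleton.mpr rfl)
    induction hx with
    | refl => exact hstart
    | tail _ hbc ih => exact h3 _ ih _ hbc

lemma is_connected_eq (g : PySem.Dict Int (List Int)) : is_connectedA g = is_connectedB g := by
  unfold is_connectedA is_connectedB
  rcases hf : g.keys.find? (fun node => decide (0 < (g.getD node []).length)) with _ | start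
  · rfl
  · have hkey : start ∈ g.keys := List.mem_of_find?_eq_some hf
    have hmem : ∀ y : Int,
        (y ∈ dfsA g (pvDfsFuelA g) (g.getD start []) (PySem.Set.add PySem.Set.empty start)) ↔
          (y ∈ stackLoopB g (pvStackFuelB g) [[start]] PySem.Set.empty) := by
      intro y
      rw [mem_dfsA_iff_reach, mem_stackB_iff_reach g start y hkey]
    simp only []
    congr 1
    funext node
    congr 1
    rw [decide_eq_decide]
    exact hmem node

-- ---------- remove_vertices: A's insert-loop equals B's comprehension under unique keys ----------

lemma removeA_go (rem : List Int) :
    ∀ (l : List (Int × List Int)) (acc : PySem.Dict Int (List Int)),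
      (acc.keys ++ l.map Prod.fst).Nodup →
      l.foldl
          (fun ng p =>
            if p.1 ∈ rem then ng
            else ng.insert p.1 (p.2.filter (fun n => decide (n ∉ rem)))) acc =
        ⟨acc.items ++ l.filterMap (fun p =>
          if p.1 ∈ rem then none
          else some (p.1, p.2.filter (fun n => decide (n ∉ rem))))⟩ := by
  intro l
  induction l with
  | nil => intro acc _; simp
  | cons p l ih =>
    intro acc hnd
    simp only [List.foldl_cons, List.filterMap_cons]
    by_cases hp : p.1 ∈ rem
    · rw [if_pos hp, if_pos hp]
      refine ih acc ?_
      have : (acc.keys ++ l.map Prod.fst).Sublist (acc.keys ++ p.1 :: l.map Prod.fst) :=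
        List.Sublist.append_left (List.sublist_cons_self _ _) _
      simp only [List.map_cons] at hnd
      exact this.nodup hnd
    · rw [if_neg hp, if_neg hp]
      have hfresh : p.1 ∉ acc.keys := by
        rw [List.map_cons, List.nodup_append] at hnd
        exact fun hmem => hnd.2.2 _ hmem _ List.mem_cons_self rfl
      have hcont : acc.contains p.1 = false := by
        rw [PySem.Dict.contains_eq_decide_mem_keys]
        simp [hfresh]
      have hitems := PySem.Dict.items_insert_of_not_contains
        (d := acc) (k := p.1) (v := p.2.filter (fun n => decide (n ∉ rem))) hcont
      have hkeys : (acc.insert p.1 (p.2.filter (fun n => decide (n ∉ rem)))).keys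
          = acc.keys ++ [p.1] := by
        simp only [PySem.Dict.keys]
        rw [hitems, List.map_append]
        rfl
      have hnd' : ((acc.insert p.1 (p.2.filter (fun n => decide (n ∉ rem)))).keys
          ++ l.map Prod.fst).Nodup := by
        rw [hkeys, List.append_assoc]
        simpa using hnd
      rw [ih _ hnd', hitems, List.append_assoc]
      rfl

lemma removeA_eq_removeB (g : PySem.Dict Int (List Int)) (rem : List Int)
    (h : g.keys.Nodup) : remove_verticesA g rem = remove_verticesB g rem := by
  unfold remove_verticesA remove_verticesB
  rw [removeA_go rem g.items PySem.Dict.empty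
    (by simpa [PySem.Dict.keys, PySem.Dict.empty] using h)]
  rfl

-- ---------- the triple scan: A's index loops = B's combination list ----------

def pvBody (g : PySem.Dict Int (List Int)) (t : List Int) : Option (Int × List Int) :=
  if !(is_connectedA (remove_verticesA g t)) then some ((t.length : Int), t) else none

lemma lLoop_eq (g : PySem.Dict Int (List Int)) (vs : List Int) (i j : Int) :
    ∀ (d a : Nat), vs.length - a = d →
      lLoopA g vs i j (PySem.List.pyRange (a : Int) (vs.length : Int)) =
        (vs.drop a).findSome?
          (fun z => pvBody g [PySem.List.pyGetD vs i 0, PySem.List.pyGetD vs j 0, z]) := by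
  intro d
  induction d with
  | zero =>
    intro a ha
    have h1 : (vs.length : Int) ≤ (a : Int) := by exact_mod_cast Nat.le_of_sub_eq_zero ha
    rw [PySem.List.pyRange_one_eq_nil h1, List.drop_eq_nil_of_le (by omega)]
    rfl
  | succ d ih =>
    intro a ha
    have hlt : a < vs.length := by omega
    rw [PySem.List.pyRange_one_cons (by exact_mod_cast hlt)]
    rw [List.drop_eq_getElem_cons hlt, List.findSome?_cons]
    have hget : PySem.List.pyGetD vs (a : Int) 0 = vs[a] := by
      rw [PySem.List.pyGetD_natCast, List.getD_eq_getElem vs 0 hlt]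
    simp only [lLoopA, hget, pvBody]
    rw [show ((a : Int) + 1) = ((a + 1 : Nat) : Int) by push_cast; ring,
      ih (a + 1) (by omega)]
    by_cases hc : is_connectedA (remove_verticesA g
        [PySem.List.pyGetD vs i 0, PySem.List.pyGetD vs j 0, vs[a]]) <;> simp only [hc, Bool.not_true, Bool.not_false] <;> rfl

lemma jLoop_eq (g : PySem.Dict Int (List Int)) (vs : List Int) (i : Int) :
    ∀ (d a : Nat), vs.length - a = d →
      jLoopA g vs i (PySem.List.pyRange (a : Int) (vs.length : Int)) =
        (pairsB (vs.drop a)).findSome?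
          (fun p => pvBody g (PySem.List.pyGetD vs i 0 :: p)) := by
  intro d
  induction d with
  | zero =>
    intro a ha
    have h1 : (vs.length : Int) ≤ (a : Int) := by exact_mod_cast Nat.le_of_sub_eq_zero ha
    rw [PySem.List.pyRange_one_eq_nil h1, List.drop_eq_nil_of_le (by omega)]
    rfl
  | succ d ih =>
    intro a ha
    have hlt : a < vs.length := by omega
    rw [PySem.List.pyRange_one_cons (by exact_mod_cast hlt)]
    rw [List.drop_eq_getElem_cons hlt]
    have hget : PySem.List.pyGetD vs (a : Int) 0 = vs[a] := by
      rw [PySem.List.pyGetD_natCast, List.getD_eq_getElem vs 0 hlt]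
    simp only [jLoopA, pairsB, List.findSome?_append, List.findSome?_map]
    rw [show ((a : Int) + 1) = ((a + 1 : Nat) : Int) by push_cast; ring,
      lLoop_eq g vs i (a : Int) (vs.length - (a + 1)) (a + 1) rfl, hget,
      ih (a + 1) (by omega)]
    have hbody : ((fun p => pvBody g (PySem.List.pyGetD vs i 0 :: p)) ∘ fun y => [vs[a], y]) =
        (fun z => pvBody g [PySem.List.pyGetD vs i 0, vs[a], z]) := rfl
    rw [hbody]
    cases (vs.drop (a + 1)).findSome?
        (fun z => pvBody g [PySem.List.pyGetD vs i 0, vs[a], z]) <;> rfl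

lemma iLoop_eq (g : PySem.Dict Int (List Int)) (vs : List Int) :
    ∀ (d a : Nat), vs.length - a = d →
      iLoopA g vs (PySem.List.pyRange (a : Int) (vs.length : Int)) =
        (triplesB (vs.drop a)).findSome? (pvBody g) := by
  intro d
  induction d with
  | zero =>
    intro a ha
    have h1 : (vs.length : Int) ≤ (a : Int) := by exact_mod_cast Nat.le_of_sub_eq_zero ha
    rw [PySem.List.pyRange_one_eq_nil h1, List.drop_eq_nil_of_le (by omega)]
    rfl
  | succ d ih =>
    intro a ha
    have hlt : a < vs.length := by omega
    rw [PySem.List.pyRange_one_cons (by exact_mod_cast hlt)]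
    rw [List.drop_eq_getElem_cons hlt]
    have hget : PySem.List.pyGetD vs (a : Int) 0 = vs[a] := by
      rw [PySem.List.pyGetD_natCast, List.getD_eq_getElem vs 0 hlt]
    simp only [iLoopA, triplesB, List.findSome?_append, List.findSome?_map]
    rw [show ((a : Int) + 1) = ((a + 1 : Nat) : Int) by push_cast; ring,
      jLoop_eq g vs (a : Int) (vs.length - (a + 1)) (a + 1) rfl, hget,
      ih (a + 1) (by omega)]
    have hbody : ((pvBody g) ∘ fun p => vs[a] :: p) =
        (fun p => pvBody g (vs[a] :: p)) := rfl
    rw [hbody]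
    cases (pairsB (vs.drop (a + 1))).findSome? (fun p => pvBody g (vs[a] :: p)) <;> rfl

lemma pairsB_length {vs : List Int} {p : List Int} (h : p ∈ pairsB vs) : p.length = 2 := by
  induction vs with
  | nil => simp [pairsB] at h
  | cons x tail ih =>
    simp only [pairsB, List.mem_append, List.mem_map] at h
    rcases h with ⟨y, _, rfl⟩ | h
    · rfl
    · exact ih h

lemma triplesB_length {vs : List Int} {t : List Int} (h : t ∈ triplesB vs) : t.length = 3 := by
  induction vs with
  | nil => simp [triplesB] at h
  | cons x tail ih =>
    simp only [triplesB, List.mem_append, List.mem_map] at h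
    rcases h with ⟨p, hp, rfl⟩ | h
    · simp [pairsB_length hp]
    · exact ih h

lemma pairsB_mem_length {vs : List Int} {p : List Int} (h : p ∈ pairsB vs) : 2 ≤ vs.length := by
  induction vs with
  | nil => simp [pairsB] at h
  | cons x tail ih =>
    simp only [pairsB, List.mem_append, List.mem_map] at h
    rcases h with ⟨y, hy, rfl⟩ | h
    · have := List.length_pos_of_mem hy; simp; omega
    · have := ih h; simp; omega

lemma triplesB_mem_length {vs : List Int} {t : List Int} (h : t ∈ triplesB vs) :
    3 ≤ vs.length := by
  induction vs with
  | nil => simp [triplesB] at h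
  | cons x tail ih =>
    simp only [triplesB, List.mem_append, List.mem_map] at h
    rcases h with ⟨p, hp, rfl⟩ | h
    · have := pairsB_mem_length hp; simp; omega
    · have := ih h; simp; omega

lemma findSome_pvBody_eq (g : PySem.Dict Int (List Int)) (hnd : g.keys.Nodup) :
    ∀ l : List (List Int), (∀ t ∈ l, t.length = 3) →
      l.findSome? (pvBody g) =
        (l.find? (fun t => !(is_connectedB (remove_verticesB g t)))).map
          (fun t => ((3 : Int), t)) := by
  intro l
  induction l with
  | nil => simp
  | cons t l ih =>
    intro hlen
    rw [List.findSome?_cons, List.find?_cons]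
    have hconn : is_connectedA (remove_verticesA g t) = is_connectedB (remove_verticesB g t) := by
      rw [removeA_eq_removeB g t hnd, is_connected_eq]
    have ht3 : ((t.length : Int)) = 3 := by rw [hlen t List.mem_cons_self]; rfl
    have hhead : pvBody g t =
        if !(is_connectedB (remove_verticesB g t)) then some ((3 : Int), t) else none := by
      unfold pvBody
      rw [hconn, ht3]
    rw [hhead]
    cases hB : is_connectedB (remove_verticesB g t)
    · simp
    · simp only [Bool.not_true, Bool.false_eq_true, if_false]
      exact ih (fun u hu => hlen u (List.mem_cons_of_mem _ hu))

lemma kLoopA_none (g : PySem.Dict Int (List Int)) (vs : List Int)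
    (h : iLoopA g vs (PySem.List.pyRange 0 (vs.length : Int)) = none) :
    ∀ ks, kLoopA g vs ks = ((vs.length : Int) - 1, []) := by
  intro ks
  induction ks with
  | nil => rfl
  | cons k ks ih => simp only [kLoopA, h, ih]

-- ---------- the verdict ----------

-- ===== VERDICT (by name: the statement is the Claim_ definition above) =====
theorem vertex_connectivity_spec : Claim_equal_vertex_connectivity := by
  intro graph _ hpre
  unfold Spec_vertex_connectivity
  unfold vertex_connectivity vertex_connectivity_alt
  simp only []
  set g : PySem.Dict Int (List Int) := ⟨graph⟩ with hg
  set vs := g.keys with hvs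
  have hnd : g.keys.Nodup := by
    have := hpre.1
    simpa [hg, PySem.Dict.keys] using this
  have hscan := iLoop_eq g vs vs.length 0 (by omega)
  rw [show ((0 : Nat) : Int) = (0 : Int) by rfl, List.drop_zero] at hscan
  have hbridge := findSome_pvBody_eq g hnd (triplesB vs) (fun t ht => triplesB_length ht)
  rcases hfs : (triplesB vs).findSome? (pvBody g) with _ | r
  · have hil : iLoopA g vs (PySem.List.pyRange 0 (vs.length : Int)) = none := by
      rw [hscan, hfs]
    have hfind : (triplesB vs).find?
        (fun t => !(is_connectedB (remove_verticesB g t))) = none := by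
      rw [hfs] at hbridge
      exact Option.map_eq_none_iff.mp hbridge.symm
    rw [kLoopA_none g vs hil, hfind]
  · obtain ⟨t, ht, hbt⟩ := List.exists_of_findSome?_eq_some hfs
    have hlen3 : 3 ≤ vs.length := triplesB_mem_length ht
    have h1lt : (1 : Int) < (vs.length : Int) := by exact_mod_cast (by omega : 1 < vs.length)
    rw [PySem.List.pyRange_one_cons h1lt]
    have hil : iLoopA g vs (PySem.List.pyRange 0 (vs.length : Int)) = some r := by
      rw [hscan, hfs]
    simp only [kLoopA, hil]
    rw [hfs] at hbridge
    rcases hf : (triplesB vs).find? (fun t => !(is_connectedB (remove_verticesB g t))) with _ | t'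
    · rw [hf] at hbridge; simp at hbridge
    · rw [hf] at hbridge
      simp only [Option.map_some] at hbridge
      rw [(Option.some_inj.mp hbridge : r = (3, t'))]
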